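-- pv_equiv track=rewrite | github.com/haixiangyan/leetcode-python | Google/1.py | solution
-- ===== SOURCE A (Python) =====
-- def solution(flowers, cap1, cap2):
--     if not flowers:
--         return 0
--
--     times = 0
--     left, right = 0, len(flowers) - 1
--     can1, can2 = 0, 0
--     while left < right:
--         # Refill
--         if flowers[left] > can1:
--             times += 1
--             can1 = cap1
--         if flowers[right] > can2:
--             times += 1
--             can2 = cap2
--
--         can1 -= flowers[left]
--         left += 1
--
--         can2 -= flowers[right]
--         right -= 1
--
--     # Last round
--     if left == right and flowers[left] > can1 + can2:
--         times += 1
--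
--     return times
-- ===== SOURCE B (Python) =====
-- def _prefix_sums(xs):
--     pre = [0]
--     for f in xs:
--         pre.append(pre[-1] + f)
--     return pre
--
--
-- def _crossings(pre, cap):
--     """Given the prefix-sum walk of one half, count how many times the walk
--     crosses the current threshold; each crossing is a refill and resets the
--     threshold to pre[i] + cap.  Return (crossings, thr - pre[-1]), the second
--     component being the water left in the can."""
--     times, thr = 0, 0
--     for p, s in zip(pre, pre[1:]):
--         if s > thr:
--             times += 1
--             thr = p + cap
--     return times, thr - pre[-1]
--
--
-- def solution(flowers, cap1, cap2):
--     n = len(flowers)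
--     k = n // 2
--     t1, r1 = _crossings(_prefix_sums(flowers[:k]), cap1)
--     t2, r2 = _crossings(_prefix_sums(flowers[n - k:][::-1]), cap2)
--     times = t1 + t2
--     if n % 2 == 1 and flowers[k] > r1 + r2:
--         times += 1
--     return times
-- ===== Notes on version B (the rewrite author's own statement) =====
-- stated objective: alternative
-- what changed: A simulates the remaining water of two cans with one interleaved two-pointer loop; B precomputes the prefix-sum walk of each half and counts threshold crossings of that walk (a crossing resets the threshold to pre[i]+cap), recovering leftover water as thr - pre[-1] for the middle check.
import Mathlib
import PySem

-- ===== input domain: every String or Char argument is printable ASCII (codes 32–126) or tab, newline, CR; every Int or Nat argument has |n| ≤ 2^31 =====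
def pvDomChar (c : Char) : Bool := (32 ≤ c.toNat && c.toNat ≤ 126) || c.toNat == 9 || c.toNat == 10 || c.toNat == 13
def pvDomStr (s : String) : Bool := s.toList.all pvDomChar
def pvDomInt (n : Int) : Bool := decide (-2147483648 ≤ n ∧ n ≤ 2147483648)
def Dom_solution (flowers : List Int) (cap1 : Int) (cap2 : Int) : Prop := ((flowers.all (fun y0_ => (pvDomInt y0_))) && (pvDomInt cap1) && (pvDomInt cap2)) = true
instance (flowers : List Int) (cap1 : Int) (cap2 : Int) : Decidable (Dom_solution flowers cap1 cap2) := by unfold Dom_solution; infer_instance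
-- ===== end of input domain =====

-- B replaces A's interleaved two-pointer simulation of two water levels by a
-- prefix-sum walk per half whose threshold crossings are counted (objective:
-- alternative, same cost). Return values only; no argument is mutated.

-- ===== PORT A =====
-- the while-loop of A; left/right are the two indices, state (can1, can2, times).
-- List.getD is exact here: every access has left < right ≤ len-1 (resp. left = right),
-- so Python's flowers[left]/flowers[right] never raises on reachable calls.
def solLoopA (flowers : List Int) (cap1 cap2 : Int) (left right : Nat) (can1 can2 times : Int) : Int :=
  if _h : left < right then
    let fl := flowers.getD left 0
    let fr := flowers.getD right 0
    let times1 := if fl > can1 then times + 1 else times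
    let can1' := if fl > can1 then cap1 else can1
    let times2 := if fr > can2 then times1 + 1 else times1
    let can2' := if fr > can2 then cap2 else can2
    solLoopA flowers cap1 cap2 (left + 1) (right - 1) (can1' - fl) (can2' - fr) times2
  else
    -- Last round
    if left = right ∧ flowers.getD left 0 > can1 + can2 then times + 1 else times
termination_by right - left
decreasing_by omega

def solution (flowers : List Int) (cap1 : Int) (cap2 : Int) : Int :=
  if flowers = [] then 0
  else solLoopA flowers cap1 cap2 0 (flowers.length - 1) 0 0 0

-- ===== PORT B =====
-- pre = [0]; for f in xs: pre.append(pre[-1] + f)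
def prefSums (xs : List Int) : List Int :=
  xs.foldl (fun pre f => pre ++ [pre.getLastD 0 + f]) [0]

-- body of the zip loop of _crossings: state (times, thr), item (p, s)
def crossStep (cap : Int) (s : Int × Int) (ps : Int × Int) : Int × Int :=
  if ps.2 > s.2 then (s.1 + 1, ps.1 + cap) else s

-- for p, s in zip(pre, pre[1:]) …; return (times, thr - pre[-1])
def crossings (pre : List Int) (cap : Int) : Int × Int :=
  let r := (pre.zip (pre.drop 1)).foldl (crossStep cap) (0, 0)
  (r.1, r.2 - pre.getLastD 0)

-- flowers[:k] → take k; flowers[n-k:][::-1] → (drop (n-k)).reverse; flowers[k] is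
-- in range whenever n % 2 = 1 (then k < n), so getD is exact.
def solution_alt (flowers : List Int) (cap1 : Int) (cap2 : Int) : Int :=
  let n := flowers.length
  let k := n / 2
  let p1 := crossings (prefSums (flowers.take k)) cap1
  let p2 := crossings (prefSums ((flowers.drop (n - k)).reverse)) cap2
  let times := p1.1 + p2.1
  if n % 2 = 1 ∧ flowers.getD k 0 > p1.2 + p2.2 then times + 1 else times

-- ===== PRECONDITION & SPEC =====
def Spec_solution (flowers : List Int) (cap1 : Int) (cap2 : Int) (out : Int) : Prop := out = solution_alt flowers cap1 cap2
instance (flowers : List Int) (cap1 : Int) (cap2 : Int) (out : Int) : Decidable (Spec_solution flowers cap1 cap2 out) := by unfold Spec_solution; infer_instance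

-- ===== CLAIM (what is proved, stated in full; the proofs are below) =====
def Claim_equal_solution : Prop := ∀ (flowers : List Int) (cap1 : Int) (cap2 : Int), Dom_solution flowers cap1 cap2 → Spec_solution flowers cap1 cap2 (solution flowers cap1 cap2)

-- ===== LEMMAS AND PROOFS =====

-- proof-side model of one watering pass with a single can: (refills, remaining water)
def stepB (cap : Int) (s : Int × Int) (f : Int) : Int × Int :=
  if f > s.2 then (s.1 + 1, cap - f) else (s.1, s.2 - f)

def passB (xs : List Int) (cap : Int) : Int × Int :=
  xs.foldl (stepB cap) (0, 0)

-- the tail of the prefix-sum walk starting from p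
def scanTail (p : Int) (xs : List Int) : List Int :=
  match xs with
  | [] => []
  | f :: fs => (p + f) :: scanTail (p + f) fs

theorem prefSums_aux (xs : List Int) :
    ∀ (acc : List Int) (p : Int), acc ≠ [] → acc.getLastD 0 = p →
    xs.foldl (fun pre f => pre ++ [pre.getLastD 0 + f]) acc = acc ++ scanTail p xs := by
  induction xs with
  | nil => intro acc p _ _; simp [scanTail]
  | cons f fs ih =>
    intro acc p hne hlast
    simp only [List.foldl_cons, scanTail]
    rw [hlast, ih (acc ++ [p + f]) (p + f) (by simp) (by simp)]
    simp

theorem prefSums_eq (xs : List Int) : prefSums xs = 0 :: scanTail 0 xs := by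
  rw [prefSums, prefSums_aux xs [0] 0 (by simp) (by simp)]
  rfl

theorem scanTail_getLastD (xs : List Int) : ∀ p : Int, (scanTail p xs).getLastD p = p + xs.sum := by
  induction xs with
  | nil => intro p; simp [scanTail]
  | cons f fs ih =>
    intro p
    simp only [scanTail, List.sum_cons]
    rw [List.getLastD_cons, ih (p + f)]
    ring

theorem cross_eq_step (cap : Int) (xs : List Int) :
    ∀ (p0 t thr : Int),
    ((p0 :: scanTail p0 xs).zip (scanTail p0 xs)).foldl (crossStep cap) (t, thr)
      = ((xs.foldl (stepB cap) (t, thr - p0)).1,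
         (xs.foldl (stepB cap) (t, thr - p0)).2 + (p0 + xs.sum)) := by
  induction xs with
  | nil => intro p0 t thr; simp [scanTail]
  | cons f fs ih =>
    intro p0 t thr
    simp only [scanTail, List.zip_cons_cons, List.foldl_cons, List.sum_cons]
    have hcond : ((p0, p0 + f).2 > thr) = (f > thr - p0) := by
      simp; constructor <;> intro h <;> omega
    by_cases h : f > thr - p0
    · have h' : (p0 + f > thr) := by omega
      simp only [crossStep, stepB, if_pos h', if_pos h]
      rw [ih (p0 + f) (t + 1) (p0 + cap)]
      have : p0 + cap - (p0 + f) = cap - f := by ring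
      rw [this]
      congr 1
      ring
    · have h' : ¬ (p0 + f > thr) := by omega
      simp only [crossStep, stepB, if_neg h', if_neg h]
      rw [ih (p0 + f) t thr]
      have : thr - (p0 + f) = thr - p0 - f := by ring
      rw [this]
      congr 1
      ring

theorem crossings_eq_passB (xs : List Int) (cap : Int) :
    crossings (prefSums xs) cap = passB xs cap := by
  rw [crossings, prefSums_eq]
  simp only [List.drop_one, List.tail_cons]
  rw [cross_eq_step cap xs 0 0 0]
  have hlast : (0 :: scanTail 0 xs).getLastD 0 = 0 + xs.sum := by
    rw [List.getLastD_cons, scanTail_getLastD]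
  rw [hlast, passB]
  have : (0 : Int) - 0 = 0 := by ring
  rw [this]
  ext <;> simp

-- list-level reformulation of A's loop: consume head and last, recurse on the middle
def loopL (cap1 cap2 : Int) (xs : List Int) (can1 can2 times : Int) : Int :=
  match xs with
  | [] => times
  | [x] => if x > can1 + can2 then times + 1 else times
  | a :: c :: rest =>
    let ys := c :: rest
    let b := ys.getLastD 0
    let mid := ys.dropLast
    let times1 := if a > can1 then times + 1 else times
    let can1' := if a > can1 then cap1 else can1
    let times2 := if b > can2 then times1 + 1 else times1
    let can2' := if b > can2 then cap2 else can2
    loopL cap1 cap2 mid (can1' - a) (can2' - b) times2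
termination_by xs.length
decreasing_by simp

-- the segment flowers[l..r] (inclusive)
def seg (fl : List Int) (l r : Nat) : List Int := (fl.take (r + 1)).drop l

theorem seg_len (fl : List Int) (l r : Nat) : (seg fl l r).length = min (r + 1) fl.length - l := by
  simp [seg]

theorem seg_cons (fl : List Int) (l r : Nat) (hl : l ≤ r) (hr : r < fl.length) :
    seg fl l r = fl.getD l 0 :: seg fl (l + 1) r := by
  have hlt : l < (fl.take (r + 1)).length := by simp; omega
  simp only [seg, List.drop_eq_getElem_cons hlt]
  congr 1
  rw [List.getElem_take]
  simp [List.getD_eq_getElem?_getD, List.getElem?_eq_getElem (by omega : l < fl.length)]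

theorem seg_getLastD (fl : List Int) (l r : Nat) (hl : l ≤ r) (hr : r < fl.length) :
    (seg fl l r).getLastD 0 = fl.getD r 0 := by
  have hlen : (seg fl l r).length = r + 1 - l := by rw [seg_len]; omega
  have hne : seg fl l r ≠ [] := by
    intro h; rw [h] at hlen; simp at hlen; omega
  rw [List.getLastD_eq_getLast?, List.getLast?_eq_some_getLast hne]
  simp only [Option.getD_some]
  rw [List.getLast_eq_getElem]
  have hidx : (seg fl l r).length - 1 < (fl.take (r + 1)).length := by simp [seg] at hlen ⊢; omega
  simp only [seg, List.getElem_drop, List.getElem_take]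
  simp only [seg] at hlen
  rw [List.getD_eq_getElem?_getD, List.getElem?_eq_getElem (by omega : r < fl.length)]
  congr 1
  omega

theorem seg_dropLast (fl : List Int) (l r : Nat) (hl : l ≤ r) (h1 : 1 ≤ r) (hr : r < fl.length) :
    (seg fl l r).dropLast = seg fl l (r - 1) := by
  simp only [seg, List.dropLast_eq_take, List.take_drop, List.take_take, List.length_drop, List.length_take]
  congr 2
  omega

theorem seg_nil (fl : List Int) (l r : Nat) (h : r < l) : seg fl l r = [] := by
  have := seg_len fl l r
  have : (seg fl l r).length = 0 := by omega
  exact List.eq_nil_of_length_eq_zero this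

theorem solLoopA_eq_loopL (fl : List Int) (cap1 cap2 : Int) :
    ∀ d l r, d = r - l → r < fl.length →
    ∀ can1 can2 times, solLoopA fl cap1 cap2 l r can1 can2 times = loopL cap1 cap2 (seg fl l r) can1 can2 times := by
  intro d
  induction d using Nat.strong_induction_on with
  | _ d ih =>
    intro l r hd hr can1 can2 times
    by_cases hlr : l < r
    · rw [solLoopA]
      simp only [dif_pos hlr]
      have hne : seg fl (l + 1) r ≠ [] := by
        have hlen := seg_len fl (l + 1) r
        intro h
        rw [h] at hlen
        simp at hlen
        omega
      obtain ⟨c, rest, hcr⟩ := List.exists_cons_of_ne_nil hne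
      rw [seg_cons fl l r (le_of_lt hlr) hr, hcr, loopL]
      rw [← hcr, seg_getLastD fl (l + 1) r (by omega) hr,
          seg_dropLast fl (l + 1) r (by omega) (by omega) hr]
      rw [ih (r - 1 - (l + 1)) (by omega) (l + 1) (r - 1) rfl (by omega)]
    · rw [solLoopA]
      simp only [dif_neg hlr]
      by_cases heq : l = r
      · subst heq
        have h1 : seg fl (l + 1) l = [] := seg_nil fl (l + 1) l (by omega)
        rw [seg_cons fl l l le_rfl hr, h1, loopL]
        simp
      · have h0 : seg fl l r = [] := seg_nil fl l r (by omega)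
        rw [h0, loopL]
        simp [heq]

theorem stepB_fst_add (cap : Int) (xs : List Int) (t c : Int) :
    xs.foldl (stepB cap) (t, c) = (t + (xs.foldl (stepB cap) (0, c)).1, (xs.foldl (stepB cap) (0, c)).2) := by
  induction xs generalizing t c with
  | nil => simp
  | cons a xs ih =>
    simp only [List.foldl_cons, stepB]
    split_ifs with h
    · rw [ih (t + 1), ih (0 + 1)]
      simp
      ring
    · exact ih t _

-- the two-pass value of B's model, starting from arbitrary state
def altVal (cap1 cap2 : Int) (xs : List Int) (can1 can2 times : Int) : Int :=
  let k := xs.length / 2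
  let p1 := xs.take k |>.foldl (stepB cap1) (0, can1)
  let p2 := (xs.drop (xs.length - k)).reverse.foldl (stepB cap2) (0, can2)
  let t := times + p1.1 + p2.1
  if xs.length % 2 = 1 ∧ xs.getD k 0 > p1.2 + p2.2 then t + 1 else t

theorem loopL_eq_altVal_aux (cap1 cap2 : Int) :
    ∀ N xs, xs.length ≤ N →
    ∀ can1 can2 times : Int, loopL cap1 cap2 xs can1 can2 times = altVal cap1 cap2 xs can1 can2 times := by
  intro N
  induction N with
  | zero =>
    intro xs hlen can1 can2 times
    have : xs = [] := List.eq_nil_of_length_eq_zero (by omega)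
    subst this
    simp [loopL, altVal]
  | succ N ih =>
    intro xs hlen can1 can2 times
    match xs with
    | [] => simp [loopL, altVal]
    | [x] =>
      simp only [loopL, altVal, List.length_cons, List.length_nil]
      norm_num
    | a :: c :: rest =>
      rw [loopL]
      have hne : (c :: rest) ≠ [] := by simp
      set b := (c :: rest).getLastD 0 with hb
      set mid := (c :: rest).dropLast with hmid
      have hys : mid ++ [b] = c :: rest := by
        rw [hb, hmid, List.getLastD_eq_getLast?, List.getLast?_eq_some_getLast hne]
        simp [List.dropLast_append_getLast]
      have hmm : mid.length = rest.length := by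
        rw [hmid]; simp
      have hmlen : mid.length ≤ N := by
        simp only [List.length_cons] at hlen; omega
      rw [ih mid hmlen]
      -- abbreviations
      set mm := mid.length with hmmdef
      set d1 : Int := if a > can1 then 1 else 0 with hd1
      set d2 : Int := if b > can2 then 1 else 0 with hd2
      set can1' : Int := (if a > can1 then cap1 else can1) - a with hc1
      set can2' : Int := (if b > can2 then cap2 else can2) - b with hc2
      set q1 := (mid.take (mm / 2)).foldl (stepB cap1) (0, can1') with hq1
      set q2 := ((mid.drop (mm - mm / 2)).reverse).foldl (stepB cap2) (0, can2') with hq2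
      -- LHS via IH
      have hL : altVal cap1 cap2 mid can1' can2'
            (if b > can2 then (if a > can1 then times + 1 else times) + 1
             else (if a > can1 then times + 1 else times)) =
          (if mm % 2 = 1 ∧ mid.getD (mm / 2) 0 > q1.2 + q2.2
           then times + d1 + d2 + q1.1 + q2.1 + 1
           else times + d1 + d2 + q1.1 + q2.1) := by
        rw [altVal]
        simp only [← hq1, ← hq2, ← hmmdef]
        rw [hd1, hd2]
        split_ifs <;> ring
      rw [hL]
      -- RHS: unfold altVal on a :: c :: rest using the decomposition a :: mid ++ [b]
      have hxs : a :: c :: rest = a :: mid ++ [b] := by rw [← hys]; rfl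
      have hlen2 : (a :: c :: rest).length = mm + 2 := by simp [hmm]
      have hk : (a :: c :: rest).length / 2 = mm / 2 + 1 := by rw [hlen2]; omega
      have htake : (a :: c :: rest).take ((a :: c :: rest).length / 2) = a :: mid.take (mm / 2) := by
        rw [hk, hxs]
        rw [List.cons_append, List.take_succ_cons, List.take_append_of_le_length (by omega)]
      have hdrop : (a :: c :: rest).drop ((a :: c :: rest).length - (a :: c :: rest).length / 2)
          = mid.drop (mm - mm / 2) ++ [b] := by
        rw [hk, hlen2, hxs]
        have : mm + 2 - (mm / 2 + 1) = (mm - mm / 2) + 1 := by omega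
        rw [this]
        rw [List.cons_append, List.drop_succ_cons, List.drop_append_of_le_length (by omega)]
      have hmod : (a :: c :: rest).length % 2 = mm % 2 := by rw [hlen2]; omega
      rw [altVal]
      simp only [htake, hdrop, hmod]
      simp only [hk]
      rw [List.reverse_append]
      simp only [List.reverse_cons, List.reverse_nil, List.nil_append, List.cons_append,
        List.foldl_cons, List.nil_append]
      have hstep1 : stepB cap1 (0, can1) a = (d1, can1') := by
        simp only [stepB, hd1, hc1]; split_ifs <;> rfl
      have hstep2 : stepB cap2 (0, can2) b = (d2, can2') := by
        simp only [stepB, hd2, hc2]; split_ifs <;> rfl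
      rw [hstep1, hstep2]
      rw [show (d1, can1') = ((d1 : Int), can1') from rfl]
      rw [stepB_fst_add cap1 _ d1 can1', stepB_fst_add cap2 _ d2 can2']
      simp only [← hq1, ← hq2]
      -- middle element
      by_cases hpar : mm % 2 = 1
      · have hmmpos : mm / 2 < mm := by omega
        have hgetD : (a :: c :: rest).getD (mm / 2 + 1) 0 = mid.getD (mm / 2) 0 := by
          rw [hxs]
          simp only [List.cons_append, List.getD_cons_succ]
          rw [List.getD_append _ _ _ _ hmmpos]
        rw [hgetD]
        simp only [hpar]
        split_ifs <;> ring
      · simp only [hpar]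
        norm_num
        ring

-- B's ports, rewritten through the pass model
theorem solution_alt_eq_altVal (fl : List Int) (c1 c2 : Int) :
    solution_alt fl c1 c2 = altVal c1 c2 fl 0 0 0 := by
  rw [solution_alt, altVal]
  simp only [crossings_eq_passB, passB]
  split_ifs <;> ring

-- ===== VERDICT (by name: the statement is the Claim_ definition above) =====
theorem solution_spec : Claim_equal_solution := by
  intro fl c1 c2 _
  unfold Spec_solution
  by_cases h : fl = []
  · subst h
    simp [solution, solution_alt, prefSums, crossings]
  · have hlen : 0 < fl.length := List.length_pos_of_ne_nil h
    rw [solution, if_neg h]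
    rw [solLoopA_eq_loopL fl c1 c2 (fl.length - 1 - 0) 0 (fl.length - 1) rfl (by omega)]
    have hseg : seg fl 0 (fl.length - 1) = fl := by
      rw [seg]
      have : fl.length - 1 + 1 = fl.length := by omega
      rw [this, List.take_length, List.drop_zero]
    rw [hseg, loopL_eq_altVal_aux c1 c2 fl.length fl le_rfl]
    rw [solution_alt_eq_altVal]
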